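-- pv_equiv track=rewrite | github.com/nakurahe/CS5800_Algorithms | codebase.py | can_satisfy_constraints
-- ===== SOURCE A (Python) =====
-- def can_satisfy_constraints(n, equalities, inequalities):
--     # Initialize Union-Find data structures
--     parent = [i for i in range(n)]
--     rank = [0] * n
--
--     # Helper functions for Union-Find
--     def find(x):
--         if parent[x] != x:
--             parent[x] = find(parent[x])
--         return parent[x]
--
--     def union(u, v):
--         root_u = find(u)
--         root_v = find(v)
--         if root_u != root_v:
--             if rank[root_u] > rank[root_v]:
--                 parent[root_v] = root_u
--             elif rank[root_u] < rank[root_v]: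
--                 parent[root_u] = root_v
--             else:
--                 parent[root_v] = root_u
--                 rank[root_u] += 1
--
--     # Process equality constraints
--     for (xi, xj) in equalities:
--         union(xi, xj)
--
--     # Check inequality constraints
--     for (xi, xj) in inequalities:
--         if find(xi) == find(xj):
--             return False
--
--     return True
-- ===== SOURCE B (Python) =====
-- def can_satisfy_constraints(n, equalities, inequalities):
--     # Component labelling by direct relabelling: no union-find, no recursion.
--     comp = list(range(n))
--     for xi, xj in equalities:
--         ci, cj = comp[xi], comp[xj]
--         if ci != cj:
--             comp = [cj if c == ci else c for c in comp]
--     for xi, xj in inequalities: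
--         if comp[xi] == comp[xj]:
--             return False
--     return True
-- ===== Notes on version B (the rewrite author's own statement) =====
-- stated objective: simpler
-- what changed: Replaces the recursive union-find with path compression and union-by-rank by a flat component-label array that is relabelled in one comprehension per merging equality, and a plain label-comparison scan over the inequalities.
-- outside the precondition, e.g. on can_satisfy_constraints(2, [], [(0, 0), (5, 5)]): A returns False, B returns False
import Mathlib
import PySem

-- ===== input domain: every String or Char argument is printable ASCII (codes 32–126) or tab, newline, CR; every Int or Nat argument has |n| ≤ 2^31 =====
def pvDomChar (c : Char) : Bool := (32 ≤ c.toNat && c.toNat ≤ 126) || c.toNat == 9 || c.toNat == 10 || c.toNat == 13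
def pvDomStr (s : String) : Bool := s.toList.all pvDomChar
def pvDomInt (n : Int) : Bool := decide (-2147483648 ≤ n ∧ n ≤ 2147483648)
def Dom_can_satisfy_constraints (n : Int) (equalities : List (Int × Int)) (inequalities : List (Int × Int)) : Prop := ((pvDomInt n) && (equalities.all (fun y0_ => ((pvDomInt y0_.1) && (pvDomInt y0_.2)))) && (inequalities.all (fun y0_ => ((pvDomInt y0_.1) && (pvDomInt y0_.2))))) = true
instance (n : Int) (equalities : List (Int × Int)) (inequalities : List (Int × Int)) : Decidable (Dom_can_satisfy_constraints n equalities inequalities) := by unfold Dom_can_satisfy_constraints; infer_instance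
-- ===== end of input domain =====

-- B replaces A's recursive union-find (path compression + union by rank) by a flat component-label
-- array relabelled once per merging equality; same return value on Pre_ (objective: simpler).

-- ===== PORT A =====
-- shared Python list-access helpers: xs[i] and xs[i] = v with Python's negative indexing;
-- the `none` (IndexError) case of PySem.List.pyGet? is excluded by Pre_, so we default it.
def pvGet (xs : List Int) (i : Int) : Int := (PySem.List.pyGet? xs i).getD 0
def pvIdx (len : Nat) (i : Int) : Nat := (if i < 0 then i + len else i).toNat
def pvSet (xs : List Int) (i v : Int) : List Int := xs.set (pvIdx xs.length i) v

-- `find(x)` of A: `if parent[x] != x: parent[x] = find(parent[x]); return parent[x]`.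
-- `fuel` is only a totality guard (callers pass n+1, enough under Pre_; fuel 0 is unreachable there).
def findA : Nat → List Int → Int → List Int × Int
  | 0, p, x => (p, pvGet p x)
  | fuel+1, p, x =>
    if pvGet p x ≠ x then
      let res := findA fuel p (pvGet p x)
      (pvSet res.1 x res.2, res.2)
    else (p, pvGet p x)

-- `union(u, v)` of A, threading (parent, rank).
def unionA (fuel : Nat) (p rank : List Int) (u v : Int) : List Int × List Int :=
  let fu := findA fuel p u
  let fv := findA fuel fu.1 v
  if fu.2 ≠ fv.2 then
    if pvGet rank fu.2 > pvGet rank fv.2 then (pvSet fv.1 fv.2 fu.2, rank)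
    else if pvGet rank fu.2 < pvGet rank fv.2 then (pvSet fv.1 fu.2 fv.2, rank)
    else (pvSet fv.1 fv.2 fu.2, pvSet rank fu.2 (pvGet rank fu.2 + 1))
  else (fv.1, rank)

-- the inequality-checking loop of A (`find` mutates parent between iterations).
def checkA (fuel : Nat) : List Int → List (Int × Int) → Bool
  | _, [] => true
  | p, q :: rest =>
    let fi := findA fuel p q.1
    let fj := findA fuel fi.1 q.2
    if fi.2 = fj.2 then false else checkA fuel fj.1 rest

def can_satisfy_constraints (n : Int) (equalities : List (Int × Int)) (inequalities : List (Int × Int)) : Bool :=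
  let len := n.toNat
  let parent0 := (List.range len).map (fun (i : Nat) => (i : Int))
  let rank0 := List.replicate len (0 : Int)
  let st := equalities.foldl (fun st q => unionA (len + 1) st.1 st.2 q.1 q.2) (parent0, rank0)
  checkA (len + 1) st.1 inequalities

-- ===== PORT B =====
def can_satisfy_constraints_alt (n : Int) (equalities : List (Int × Int)) (inequalities : List (Int × Int)) : Bool :=
  let comp0 := (List.range n.toNat).map (fun (i : Nat) => (i : Int))
  let comp := equalities.foldl (fun comp q =>
    let ci := pvGet comp q.1
    let cj := pvGet comp q.2
    if ci ≠ cj then comp.map (fun c => if c = ci then cj else c) else comp) comp0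
  inequalities.all (fun q => !(pvGet comp q.1 == pvGet comp q.2))

-- ===== PRECONDITION & SPEC =====
-- Pre_ excludes any input containing an out-of-range vertex index: on such inputs A's `parent[x]`
-- raises IndexError, except when an earlier inequality already made A return False before the bad
-- index is reached — those inputs are excluded too (claim.json cites one such input).
def Pre_can_satisfy_constraints (n : Int) (equalities : List (Int × Int)) (inequalities : List (Int × Int)) : Prop :=
  (∀ q ∈ equalities, -n ≤ q.1 ∧ q.1 < n ∧ -n ≤ q.2 ∧ q.2 < n) ∧
  (∀ q ∈ inequalities, -n ≤ q.1 ∧ q.1 < n ∧ -n ≤ q.2 ∧ q.2 < n)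
instance (n : Int) (equalities : List (Int × Int)) (inequalities : List (Int × Int)) : Decidable (Pre_can_satisfy_constraints n equalities inequalities) := by unfold Pre_can_satisfy_constraints; infer_instance

def pvWitness_can_satisfy_constraints : Int × (List (Int × Int)) × (List (Int × Int)) := (3, [(0, 1)], [(1, 2)])

def Spec_can_satisfy_constraints (n : Int) (equalities : List (Int × Int)) (inequalities : List (Int × Int)) (out : Bool) : Prop := out = can_satisfy_constraints_alt n equalities inequalities
instance (n : Int) (equalities : List (Int × Int)) (inequalities : List (Int × Int)) (out : Bool) : Decidable (Spec_can_satisfy_constraints n equalities inequalities out) := by unfold Spec_can_satisfy_constraints; infer_instance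

-- ===== CLAIM (what is proved, stated in full; the proofs are below) =====
def Claim_equal_can_satisfy_constraints : Prop := ∀ (n : Int) (equalities : List (Int × Int)) (inequalities : List (Int × Int)), Dom_can_satisfy_constraints n equalities inequalities → Pre_can_satisfy_constraints n equalities inequalities → Spec_can_satisfy_constraints n equalities inequalities (can_satisfy_constraints n equalities inequalities)

-- ===== LEMMAS AND PROOFS =====

-- canonical (Nat-indexed) view of A's parent array and its well-formedness invariant:
-- entries in range, every node reaches a fixpoint (a root)
def pvStep (p : List Int) (j : Nat) : Nat := (p.getD j 0).toNat
def pvRoot (p : List Int) (j : Nat) : Nat := (pvStep p)^[p.length] j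
def pvRng (p : List Int) : Prop := ∀ j, j < p.length → 0 ≤ p.getD j 0 ∧ p.getD j 0 < (p.length : Int)
def pvReach (p : List Int) : Prop := ∀ j, j < p.length → ∃ r k, pvStep p r = r ∧ (pvStep p)^[k] j = r
def pvWF (p : List Int) : Prop := pvRng p ∧ pvReach p
-- the simulation invariant between A's parent array and B's component labels:
-- two nodes have the same union-find root iff they carry the same label
def pvInv (p comp : List Int) : Prop :=
  p.length = comp.length ∧ pvWF p ∧
    ∀ a b, a < comp.length → b < comp.length →
      (pvRoot p a = pvRoot p b ↔ comp.getD a 0 = comp.getD b 0)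


lemma pvIdx_lt (len : Nat) (i : Int) (h1 : -(len : Int) ≤ i) (h2 : i < len) : pvIdx len i < len := by
  unfold pvIdx; omega
lemma pvGet_eq (p : List Int) (i : Int) (h1 : -(p.length : Int) ≤ i) (h2 : i < p.length) :
    pvGet p i = p.getD (pvIdx p.length i) 0 := by
  unfold pvGet pvIdx
  by_cases hpos : 0 ≤ i
  · have e1 : (if i < 0 then i + (p.length : Int) else i).toNat = i.toNat := by omega
    rw [e1, PySem.List.pyGet?_of_nonneg p hpos, List.getD_eq_getElem?_getD]
  · have hneg : i < 0 := by omega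
    have e1 : (if i < 0 then i + (p.length : Int) else i).toNat = p.length - (-i).toNat := by omega
    rw [e1]
    simp only [PySem.List.pyGet?, PySem.List.pyIdx?]
    rw [if_neg (by omega), if_pos (by omega)]
    simp [List.getD_eq_getElem?_getD]
lemma getD_set (l : List Int) (a j : Nat) (v : Int) (ha : a < l.length) :
    (l.set a v).getD j 0 = if j = a then v else l.getD j 0 := by
  rw [List.getD_eq_getElem?_getD, List.getD_eq_getElem?_getD, List.getElem?_set]
  split_ifs with h1 h2
  · simp
  · omega
  · omega
  · rfl
lemma set_self (p : List Int) (j : Nat) (v : Int) (hj : j < p.length) (hv : p.getD j 0 = v) :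
    p.set j v = p := by
  apply List.ext_getElem (by simp)
  intro i hi hi2
  rw [List.getElem_set]
  split_ifs with h
  · subst h
    rw [List.getD_eq_getElem _ _ hj] at hv
    exact hv.symm
  · rfl
lemma step_lt (p : List Int) (hr : pvRng p) (j : Nat) (hj : j < p.length) : pvStep p j < p.length := by
  have := hr j hj; unfold pvStep; omega
lemma iter_lt (p : List Int) (hr : pvRng p) (k j : Nat) (hj : j < p.length) :
    (pvStep p)^[k] j < p.length := by
  induction k generalizing j with
  | zero => simpa
  | succ k ih => rw [Function.iterate_succ_apply]; exact ih _ (step_lt p hr j hj)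
lemma step_cast (p : List Int) (hr : pvRng p) (j : Nat) (hj : j < p.length) :
    ((pvStep p j : Nat) : Int) = p.getD j 0 := by
  have := hr j hj; unfold pvStep; omega
lemma reach_bound (p : List Int) (hr : pvRng p) (j r k : Nat) (hj : j < p.length)
    (hroot : pvStep p r = r) (hk : (pvStep p)^[k] j = r) :
    (pvStep p)^[p.length] j = r := by
  set f := pvStep p with hf
  set n := p.length with hn
  have habs : ∀ a b, a ≤ b → f^[a] j = r → f^[b] j = r := by
    intro a b hab ha
    have h2 := Function.iterate_add_apply f (b - a) a j
    have h3 : b - a + a = b := by omega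
    rw [h3] at h2
    rw [h2, ha, Function.iterate_fixed hroot]
  by_cases hex : ∃ k', k' ≤ n ∧ f^[k'] j = r
  · obtain ⟨k', hk1, hk2⟩ := hex
    exact habs k' n hk1 hk2
  · exfalso
    push Not at hex
    by_cases hinj : ∃ s t, s < t ∧ t ≤ n ∧ f^[s] j = f^[t] j
    · obtain ⟨s, t, hst, htn, hper⟩ := hinj
      have per : ∀ m, s ≤ m → f^[m + (t - s)] j = f^[m] j := by
        intro m hm
        have h2 := Function.iterate_add_apply f (m - s) s j
        have h3 : m - s + s = m := by omega
        rw [h3] at h2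
        have h4 := Function.iterate_add_apply f (m - s) t j
        have h5 : m - s + t = m + (t - s) := by omega
        rw [h5] at h4
        rw [h4, ← hper, ← h2]
      have main : ∀ k'', f^[k''] j = r → False := by
        intro k''
        induction k'' using Nat.strong_induction_on with
        | _ k'' ih =>
          intro hkr
          by_cases hle : k'' ≤ n
          · exact hex k'' hle hkr
          · have h6 : f^[k'' - (t - s)] j = r := by
              have h7 := per (k'' - (t - s)) (by omega)
              have h8 : k'' - (t - s) + (t - s) = k'' := by omega
              rw [h8] at h7
              rw [← h7]
              exact hkr
            exact ih (k'' - (t - s)) (by omega) h6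
      exact main k hk
    · push Not at hinj
      have hio : Set.InjOn (fun i => f^[i] j) (Finset.range (n + 1) : Finset Nat) := by
        intro a ha b hb hab
        simp only [Finset.coe_range, Set.mem_Iio] at ha hb
        by_contra hne
        rcases Nat.lt_or_ge a b with h | h
        · exact absurd hab (by
            intro hcontra
            exact absurd hcontra (by
              have := hinj a b h (by omega)
              simpa using this))
        · have hba : b < a := by omega
          exact (hinj b a hba (by omega)) hab.symm
      have hmaps : ∀ i ∈ Finset.range (n + 1), f^[i] j ∈ Finset.range n := by
        intro i _
        simp only [Finset.mem_range]
        exact iter_lt p hr i j hj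
      have hcard := Finset.card_le_card_of_injOn (fun i => f^[i] j) hmaps hio
      simp at hcard
lemma root_isRoot (p : List Int) (hwf : pvWF p) (j : Nat) (hj : j < p.length) :
    pvStep p (pvRoot p j) = pvRoot p j := by
  obtain ⟨r, k, hroot, hk⟩ := hwf.2 j hj
  have := reach_bound p hwf.1 j r k hj hroot hk
  unfold pvRoot; rw [this]; exact hroot
lemma root_lt (p : List Int) (hr : pvRng p) (j : Nat) (hj : j < p.length) : pvRoot p j < p.length :=
  iter_lt p hr _ j hj
lemma root_fix (p : List Int) (j : Nat) (h : pvStep p j = j) : pvRoot p j = j := by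
  unfold pvRoot; exact Function.iterate_fixed h _
lemma root_step (p : List Int) (hwf : pvWF p) (j : Nat) (hj : j < p.length) :
    pvRoot p (pvStep p j) = pvRoot p j := by
  unfold pvRoot
  have h1 : (pvStep p)^[p.length] (pvStep p j) = (pvStep p)^[p.length + 1] j :=
    (Function.iterate_succ_apply (pvStep p) p.length j).symm
  rw [h1, Function.iterate_succ_apply']
  have h2 := root_isRoot p hwf j hj
  unfold pvRoot at h2
  exact h2
lemma root_root (p : List Int) (hwf : pvWF p) (j : Nat) (hj : j < p.length) :
    pvRoot p (pvRoot p j) = pvRoot p j :=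
  root_fix p _ (root_isRoot p hwf j hj)

lemma pvUpdate (p : List Int) (hwf : pvWF p) (a b : Nat) (ha : a < p.length) (hb : b < p.length)
    (hrootb : pvStep p b = b) (hcase : pvRoot p a = b ∨ pvStep p a = a) :
    pvWF (p.set a (b : Int)) ∧
      ∀ j, j < p.length → pvRoot (p.set a (b : Int)) j = if pvRoot p j = a then b else pvRoot p j := by
  have hlen : (p.set a (b : Int)).length = p.length := by simp
  have hf' : ∀ j, pvStep (p.set a (b : Int)) j = if j = a then b else pvStep p j := by
    intro j
    unfold pvStep
    rw [getD_set p a j (b : Int) ha]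
    split_ifs with h
    · simp
    · rfl
  have hba : pvStep p a ≠ a → b ≠ a := by
    intro hna heq
    rw [heq] at hrootb
    exact hna hrootb
  have hTroot : ∀ j, j < p.length →
      pvStep (p.set a (b : Int)) (if pvRoot p j = a then b else pvRoot p j)
        = (if pvRoot p j = a then b else pvRoot p j) := by
    intro j hj
    split_ifs with h
    · rw [hf']
      split_ifs with h2
      · rfl
      · exact hrootb
    · rw [hf', if_neg h]
      exact root_isRoot p hwf j hj
  have key : ∀ k j, j < p.length → (pvStep p)^[k] j = pvRoot p j →
      ∃ m, (pvStep (p.set a (b : Int)))^[m] j = (if pvRoot p j = a then b else pvRoot p j) := by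
    intro k
    induction k with
    | zero =>
      intro j hj h0
      simp only [Function.iterate_zero, id_eq] at h0
      have hjroot : pvRoot p j = j := h0.symm
      by_cases hja : j = a
      · refine ⟨1, ?_⟩
        rw [Function.iterate_one, hf', if_pos hja, hjroot, if_pos hja]
      · refine ⟨0, ?_⟩
        simp only [Function.iterate_zero, id_eq]
        rw [hjroot, if_neg hja]
    | succ k ih =>
      intro j hj hsucc
      by_cases hjroot : pvStep p j = j
      · have hjr : pvRoot p j = j := root_fix p j hjroot
        by_cases hja : j = a
        · refine ⟨1, ?_⟩
          rw [Function.iterate_one, hf', if_pos hja, hjr, if_pos hja]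
        · refine ⟨0, ?_⟩
          simp only [Function.iterate_zero, id_eq]
          rw [hjr, if_neg hja]
      · by_cases hja : j = a
        · rcases hcase with hc | hc
          · refine ⟨1, ?_⟩
            have hc' : pvRoot p j = b := by rw [hja]; exact hc
            have hbna : pvRoot p j ≠ a := by
              intro heq
              have hra := root_isRoot p hwf j hj
              rw [heq] at hra
              exact hjroot (by rw [hja]; exact hra)
            rw [Function.iterate_one, hf', if_pos hja, if_neg hbna, hc']
          · exact absurd (by rw [hja]; exact hc) hjroot
        · have hstep : pvStep (p.set a (b : Int)) j = pvStep p j := by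
            rw [hf', if_neg hja]
          have hfj : pvStep p j < p.length := step_lt p hwf.1 j hj
          have hnext : (pvStep p)^[k] (pvStep p j) = pvRoot p (pvStep p j) := by
            rw [root_step p hwf j hj, ← Function.iterate_succ_apply]
            exact hsucc
          obtain ⟨m, hm⟩ := ih (pvStep p j) hfj hnext
          refine ⟨m + 1, ?_⟩
          rw [Function.iterate_succ_apply, hstep, hm, root_step p hwf j hj]
  have hrng : pvRng (p.set a (b : Int)) := by
    intro j hj
    simp only [List.length_set] at hj ⊢
    rw [getD_set p a j (b : Int) ha]
    split_ifs with h
    · constructor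
      · positivity
      · exact_mod_cast hb
    · exact hwf.1 j hj
  have hroots : ∀ j, j < p.length →
      pvRoot (p.set a (b : Int)) j = if pvRoot p j = a then b else pvRoot p j := by
    intro j hj
    obtain ⟨m, hm⟩ := key p.length j hj rfl
    have hT : pvStep (p.set a (b : Int)) (if pvRoot p j = a then b else pvRoot p j)
        = (if pvRoot p j = a then b else pvRoot p j) := hTroot j hj
    have h3 := reach_bound (p.set a (b : Int)) hrng j _ m (by simpa using hj) hT hm
    have h2 : pvRoot (p.set a (b : Int)) j
        = (pvStep (p.set a (b : Int)))^[(p.set a (b : Int)).length] j := rfl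
    rw [h2, h3]
  refine ⟨⟨hrng, ?_⟩, hroots⟩
  intro j hj
  rw [hlen] at hj
  obtain ⟨m, hm⟩ := key p.length j hj rfl
  exact ⟨_, m, hTroot j hj, hm⟩

lemma find_root (fuel : Nat) (p : List Int) (j : Nat) (hj : j < p.length) (hr : pvRng p)
    (hroot : pvStep p j = j) : findA fuel p (j : Int) = (p, (j : Int)) := by
  have hidx : pvIdx p.length (j : Int) = j := by unfold pvIdx; omega
  have hget : pvGet p (j : Int) = (j : Int) := by
    rw [pvGet_eq p _ (by omega) (by exact_mod_cast hj), hidx]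
    have h1 := hr j hj
    unfold pvStep at hroot
    omega
  cases fuel with
  | zero => simp [findA, hget]
  | succ fuel => simp [findA, hget]

lemma find_ok (fuel : Nat) (p : List Int) (x : Int) (k : Nat) (hwf : pvWF p)
    (hx1 : -(p.length : Int) ≤ x) (hx2 : x < p.length)
    (hk : pvStep p ((pvStep p)^[k] (pvIdx p.length x)) = (pvStep p)^[k] (pvIdx p.length x))
    (hfuel : k < fuel) :
    (findA fuel p x).1.length = p.length ∧ pvWF (findA fuel p x).1 ∧
      (findA fuel p x).2 = ((pvRoot p (pvIdx p.length x) : Nat) : Int) ∧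
      ∀ j, j < p.length → pvRoot (findA fuel p x).1 j = pvRoot p j := by
  induction fuel generalizing k p x with
  | zero => omega
  | succ fuel ih =>
    have hj0 : pvIdx p.length x < p.length := pvIdx_lt _ _ hx1 hx2
    have hget : pvGet p x = ((pvStep p (pvIdx p.length x) : Nat) : Int) := by
      rw [pvGet_eq p x hx1 hx2]
      exact (step_cast p hwf.1 _ hj0).symm
    by_cases hcond : pvGet p x = x
    · have hres : findA (fuel + 1) p x = (p, pvGet p x) := by
        simp [findA, hcond]
      have hx0 : 0 ≤ x := by rw [← hcond, hget]; positivity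
      have hxj : ((pvIdx p.length x : Nat) : Int) = x := by unfold pvIdx; omega
      have hroot : pvStep p (pvIdx p.length x) = pvIdx p.length x := by omega
      have hrfix : pvRoot p (pvIdx p.length x) = pvIdx p.length x := root_fix p _ hroot
      rw [hres]
      refine ⟨rfl, hwf, ?_, fun j _ => rfl⟩
      show pvGet p x = _
      rw [hget, hroot, hrfix]
    · have hres : findA (fuel + 1) p x =
          (pvSet (findA fuel p (pvGet p x)).1 x (findA fuel p (pvGet p x)).2,
            (findA fuel p (pvGet p x)).2) := by
        simp [findA, hcond]
      cases k with
      | zero =>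
        simp only [Function.iterate_zero, id_eq] at hk
        have hgj : pvGet p x = ((pvIdx p.length x : Nat) : Int) := by rw [hget, hk]
        have hinner : findA fuel p (pvGet p x) = (p, ((pvIdx p.length x : Nat) : Int)) := by
          rw [hgj]
          exact find_root fuel p _ hj0 hwf.1 hk
        have hsetself : pvSet p x ((pvIdx p.length x : Nat) : Int) = p := by
          unfold pvSet
          exact set_self p _ _ hj0 (by rw [← step_cast p hwf.1 _ hj0, hk])
        rw [hres, hinner]
        rw [show pvSet p x ((pvIdx p.length x : Nat) : Int) = p from hsetself]
        refine ⟨rfl, hwf, ?_, fun j _ => rfl⟩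
        show ((pvIdx p.length x : Nat) : Int) = _
        rw [root_fix p _ hk]
      | succ k' =>
        have hpx0 : 0 ≤ pvGet p x := by rw [hget]; positivity
        have hpxlt : pvGet p x < p.length := by
          have := step_lt p hwf.1 _ hj0
          omega
        have hpx1 : -(p.length : Int) ≤ pvGet p x := by omega
        have hj1 : pvIdx p.length (pvGet p x) = pvStep p (pvIdx p.length x) := by
          have hs := hget
          set s := pvStep p (pvIdx p.length x) with hsdef
          unfold pvIdx
          omega
        have hk' : pvStep p ((pvStep p)^[k'] (pvIdx p.length (pvGet p x)))
            = (pvStep p)^[k'] (pvIdx p.length (pvGet p x)) := by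
          rw [hj1, ← Function.iterate_succ_apply]
          exact hk
        obtain ⟨hl1, hwf1, hval, hpres⟩ := ih p (pvGet p x) k' hwf hpx1 hpxlt hk' (by omega)
        have hrootval : pvRoot p (pvIdx p.length (pvGet p x)) = pvRoot p (pvIdx p.length x) := by
          rw [hj1]
          exact root_step p hwf _ hj0
        have hval' : (findA fuel p (pvGet p x)).2
            = ((pvRoot p (pvIdx p.length x) : Nat) : Int) := by rw [hval, hrootval]
        have hrlt : pvRoot p (pvIdx p.length x) < p.length := root_lt p hwf.1 _ hj0
        have hridx : pvIdx (findA fuel p (pvGet p x)).1.length x = pvIdx p.length x := by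
          rw [hl1]
        have hsetform : pvSet (findA fuel p (pvGet p x)).1 x (findA fuel p (pvGet p x)).2
            = (findA fuel p (pvGet p x)).1.set (pvIdx p.length x)
                ((pvRoot p (pvIdx p.length x) : Nat) : Int) := by
          unfold pvSet
          rw [hridx, hval']
        have hrootb : pvStep (findA fuel p (pvGet p x)).1 (pvRoot p (pvIdx p.length x))
            = pvRoot p (pvIdx p.length x) := by
          have h1 := hpres (pvIdx p.length x) hj0
          rw [← h1]
          exact root_isRoot _ hwf1 _ (by omega)
        have hupd := pvUpdate (findA fuel p (pvGet p x)).1 hwf1 (pvIdx p.length x)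
          (pvRoot p (pvIdx p.length x)) (by omega) (by omega) hrootb
          (Or.inl (by rw [hpres _ hj0]))
        rw [hres]
        refine ⟨?_, ?_, hval', ?_⟩
        · rw [hsetform]
          simp [hl1]
        · rw [hsetform]
          exact hupd.1
        · intro j hj
          rw [hsetform]
          have h2 := hupd.2 j (by omega)
          rw [h2, hpres j hj]
          split_ifs with h
          · rw [← h]
            exact root_root p hwf j hj
          · rfl

lemma merge_iff {α : Type} [DecidableEq α] (w l x y : α) :
    ((if x = l then w else x) = (if y = l then w else y)) ↔
      (x = y ∨ ((x = l ∨ x = w) ∧ (y = l ∨ y = w))) := by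
  split_ifs <;> simp_all <;> tauto

lemma find_spec (p : List Int) (x : Int) (hwf : pvWF p)
    (hx1 : -(p.length : Int) ≤ x) (hx2 : x < p.length) :
    (findA (p.length + 1) p x).1.length = p.length ∧ pvWF (findA (p.length + 1) p x).1 ∧
      (findA (p.length + 1) p x).2 = ((pvRoot p (pvIdx p.length x) : Nat) : Int) ∧
      ∀ j, j < p.length → pvRoot (findA (p.length + 1) p x).1 j = pvRoot p j := by
  apply find_ok (p.length + 1) p x p.length hwf hx1 hx2 ?_ (by omega)
  have h := root_isRoot p hwf _ (pvIdx_lt _ _ hx1 hx2)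
  unfold pvRoot at h
  exact h

lemma pvIdx_natCast (len j : Nat) (hj : j < len) : pvIdx len (j : Int) = j := by
  unfold pvIdx; omega

lemma id_getD (len j : Nat) (hj : j < len) :
    ((List.range len).map (fun (i : Nat) => (i : Int))).getD j 0 = (j : Int) := by
  exact PySem.List.getD_map_range (fun (i : Nat) => (i : Int)) len j 0 hj

lemma getD_map_if (comp : List Int) (f : Int → Int) (a : Nat) (ha : a < comp.length) :
    (comp.map f).getD a 0 = f (comp.getD a 0) := by
  rw [List.getD_eq_getElem _ _ (by simpa using ha), List.getElem_map,
    List.getD_eq_getElem _ _ ha]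

lemma pvInv_init (len : Nat) :
    pvInv ((List.range len).map (fun (i : Nat) => (i : Int))) ((List.range len).map (fun (i : Nat) => (i : Int))) := by
  have hlen : ((List.range len).map (fun (i : Nat) => (i : Int))).length = len := by simp
  have hstep : ∀ j, j < len → pvStep ((List.range len).map (fun (i : Nat) => (i : Int))) j = j := by
    intro j hj
    unfold pvStep
    rw [id_getD len j hj]
    omega
  have hroot : ∀ j, j < len → pvRoot ((List.range len).map (fun (i : Nat) => (i : Int))) j = j :=
    fun j hj => root_fix _ j (hstep j hj)
  refine ⟨by simp, ⟨?_, ?_⟩, ?_⟩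
  · intro j hj
    rw [hlen] at hj
    rw [id_getD len j hj, hlen]
    omega
  · intro j hj
    rw [hlen] at hj
    exact ⟨j, 0, hstep j hj, rfl⟩
  · intro a b ha hb
    rw [hlen] at ha hb
    rw [hroot a ha, hroot b hb, id_getD len a ha, id_getD len b hb]
    omega

set_option maxHeartbeats 1000000 in
lemma merged_inv (p2 comp : List Int) (hlen2 : p2.length = comp.length) (hwf2 : pvWF p2)
    (hiff2 : ∀ a b, a < comp.length → b < comp.length →
      (pvRoot p2 a = pvRoot p2 b ↔ comp.getD a 0 = comp.getD b 0))
    (w l : Nat) (hw : w < comp.length) (hl : l < comp.length)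
    (hrw : pvStep p2 w = w) (hrl : pvStep p2 l = l)
    (ci cj : Int)
    (hWL : ∀ a, a < comp.length →
      ((pvRoot p2 a = w ∨ pvRoot p2 a = l) ↔ (comp.getD a 0 = ci ∨ comp.getD a 0 = cj))) :
    pvInv (pvSet p2 (l : Int) (w : Int)) (comp.map (fun c => if c = ci then cj else c)) := by
  have hsetidx : pvSet p2 (l : Int) (w : Int) = p2.set l (w : Int) := by
    unfold pvSet
    rw [pvIdx_natCast p2.length l (by omega)]
  have hupd := pvUpdate p2 hwf2 l w (by omega) (by omega) hrw (Or.inr hrl)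
  rw [hsetidx]
  refine ⟨by simp [hlen2], hupd.1, ?_⟩
  intro a b ha hb
  simp only [List.length_map] at ha hb
  rw [hupd.2 a (by omega), hupd.2 b (by omega),
    getD_map_if comp _ a ha, getD_map_if comp _ b hb]
  rw [merge_iff w l (pvRoot p2 a) (pvRoot p2 b), merge_iff cj ci (comp.getD a 0) (comp.getD b 0)]
  have h1 := hiff2 a b ha hb
  have h2 := hWL a ha
  have h3 := hWL b hb
  tauto

set_option maxHeartbeats 1000000 in
lemma find2 (p comp : List Int) (q : Int × Int) (hinv : pvInv p comp)
    (hq : -(comp.length : Int) ≤ q.1 ∧ q.1 < comp.length ∧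
      -(comp.length : Int) ≤ q.2 ∧ q.2 < comp.length) :
    (findA (comp.length + 1) (findA (comp.length + 1) p q.1).1 q.2).1.length = comp.length ∧
    pvWF (findA (comp.length + 1) (findA (comp.length + 1) p q.1).1 q.2).1 ∧
    (∀ j, j < comp.length →
      pvRoot (findA (comp.length + 1) (findA (comp.length + 1) p q.1).1 q.2).1 j = pvRoot p j) ∧
    (findA (comp.length + 1) p q.1).2 = ((pvRoot p (pvIdx comp.length q.1) : Nat) : Int) ∧
    (findA (comp.length + 1) (findA (comp.length + 1) p q.1).1 q.2).2
      = ((pvRoot p (pvIdx comp.length q.2) : Nat) : Int) ∧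
    ((pvRoot p (pvIdx comp.length q.1) = pvRoot p (pvIdx comp.length q.2))
      ↔ pvGet comp q.1 = pvGet comp q.2) ∧
    (∀ a, a < comp.length →
      ((pvRoot p a = pvRoot p (pvIdx comp.length q.1)) ↔ comp.getD a 0 = pvGet comp q.1)) ∧
    (∀ a, a < comp.length →
      ((pvRoot p a = pvRoot p (pvIdx comp.length q.2)) ↔ comp.getD a 0 = pvGet comp q.2)) := by
  obtain ⟨hlen, hwf, hiff⟩ := hinv
  obtain ⟨h1, h2, h3, h4⟩ := hq
  have hx1 : -(p.length : Int) ≤ q.1 := by rw [hlen]; exact h1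
  have hx2 : q.1 < p.length := by rw [hlen]; exact h2
  have hfuel : comp.length + 1 = p.length + 1 := by rw [hlen]
  have hju : pvIdx p.length q.1 = pvIdx comp.length q.1 := by rw [hlen]
  have hjv : pvIdx p.length q.2 = pvIdx comp.length q.2 := by rw [hlen]
  have hjul : pvIdx comp.length q.1 < comp.length := pvIdx_lt _ _ h1 h2
  have hjvl : pvIdx comp.length q.2 < comp.length := pvIdx_lt _ _ h3 h4
  rw [hfuel]
  obtain ⟨hl1, hwf1, hval1, hpres1⟩ := find_spec p q.1 hwf hx1 hx2
  have hx3 : -(((findA (p.length + 1) p q.1).1.length : Nat) : Int) ≤ q.2 := by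
    rw [hl1, hlen]; exact h3
  have hx4 : q.2 < (((findA (p.length + 1) p q.1).1.length : Nat) : Int) := by
    rw [hl1, hlen]; exact h4
  have hfs2 := find_spec _ q.2 hwf1 hx3 hx4
  rw [hl1] at hfs2
  obtain ⟨hl2, hwf2, hval2, hpres2⟩ := hfs2
  have hgu : pvGet comp q.1 = comp.getD (pvIdx comp.length q.1) 0 := pvGet_eq comp q.1 h1 h2
  have hgv : pvGet comp q.2 = comp.getD (pvIdx comp.length q.2) 0 := pvGet_eq comp q.2 h3 h4
  have hrootv : pvRoot (findA (p.length + 1) p q.1).1 (pvIdx comp.length q.2)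
      = pvRoot p (pvIdx comp.length q.2) := hpres1 _ (by rw [hlen]; exact hjvl)
  refine ⟨by rw [hl2, hlen], hwf2, ?_, ?_, ?_, ?_, ?_, ?_⟩
  · intro j hj
    rw [hpres2 j (by rw [hlen]; exact hj), hpres1 j (by rw [hlen]; exact hj)]
  · rw [hval1, hju]
  · rw [hval2, hjv, hrootv]
  · rw [hgu, hgv]
    exact hiff _ _ hjul hjvl
  · intro a ha
    rw [hgu]
    exact hiff a _ (by omega) hjul
  · intro a ha
    rw [hgv]
    exact hiff a _ (by omega) hjvl

set_option maxHeartbeats 1000000 in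
lemma union_step (p rank comp : List Int) (q : Int × Int) (hinv : pvInv p comp)
    (hq : -(comp.length : Int) ≤ q.1 ∧ q.1 < comp.length ∧
      -(comp.length : Int) ≤ q.2 ∧ q.2 < comp.length) :
    pvInv (unionA (comp.length + 1) p rank q.1 q.2).1
      (if pvGet comp q.1 ≠ pvGet comp q.2
        then comp.map (fun c => if c = pvGet comp q.1 then pvGet comp q.2 else c) else comp) := by
  obtain ⟨hlenc, hwfp, hiffp⟩ := hinv
  obtain ⟨hL, hWF, hroots, hval1, hval2, hiffr, hAu, hAv⟩ :=
    find2 p comp q ⟨hlenc, hwfp, hiffp⟩ hq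
  obtain ⟨h1, h2, h3, h4⟩ := hq
  have hjul : pvIdx comp.length q.1 < comp.length := pvIdx_lt _ _ h1 h2
  have hjvl : pvIdx comp.length q.2 < comp.length := pvIdx_lt _ _ h3 h4
  have hrul : pvRoot p (pvIdx comp.length q.1) < comp.length := by
    have := root_lt p hwfp.1 (pvIdx comp.length q.1) (by omega)
    omega
  have hrvl : pvRoot p (pvIdx comp.length q.2) < comp.length := by
    have := root_lt p hwfp.1 (pvIdx comp.length q.2) (by omega)
    omega
  have hiff2 : ∀ a b, a < comp.length → b < comp.length →
      (pvRoot (findA (comp.length + 1) (findA (comp.length + 1) p q.1).1 q.2).1 a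
        = pvRoot (findA (comp.length + 1) (findA (comp.length + 1) p q.1).1 q.2).1 b
        ↔ comp.getD a 0 = comp.getD b 0) := by
    intro a b ha hb
    rw [hroots a ha, hroots b hb]
    exact hiffp a b ha hb
  have hinv2 : pvInv (findA (comp.length + 1) (findA (comp.length + 1) p q.1).1 q.2).1 comp :=
    ⟨hL, hWF, hiff2⟩
  simp only [unionA]
  by_cases hcc : pvGet comp q.1 = pvGet comp q.2
  · have hrr : pvRoot p (pvIdx comp.length q.1) = pvRoot p (pvIdx comp.length q.2) :=
      hiffr.mpr hcc
    have hBeq : (if pvGet comp q.1 ≠ pvGet comp q.2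
        then comp.map (fun c => if c = pvGet comp q.1 then pvGet comp q.2 else c) else comp)
        = comp := if_neg (fun h => h hcc)
    have hAne : ¬ ((findA (comp.length + 1) p q.1).2
        ≠ (findA (comp.length + 1) (findA (comp.length + 1) p q.1).1 q.2).2) := by
      rw [hval1, hval2, hrr]
      simp
    rw [hBeq, if_neg hAne]
    exact hinv2
  · have hrr : pvRoot p (pvIdx comp.length q.1) ≠ pvRoot p (pvIdx comp.length q.2) :=
      fun h => hcc (hiffr.mp h)
    have hBeq : (if pvGet comp q.1 ≠ pvGet comp q.2
        then comp.map (fun c => if c = pvGet comp q.1 then pvGet comp q.2 else c) else comp)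
        = comp.map (fun c => if c = pvGet comp q.1 then pvGet comp q.2 else c) := if_pos hcc
    have hAne : (findA (comp.length + 1) p q.1).2
        ≠ (findA (comp.length + 1) (findA (comp.length + 1) p q.1).1 q.2).2 := by
      rw [hval1, hval2]
      intro h
      exact hrr (by exact_mod_cast h)
    rw [hBeq, if_pos hAne]
    have hstepu : pvStep (findA (comp.length + 1) (findA (comp.length + 1) p q.1).1 q.2).1
        (pvRoot p (pvIdx comp.length q.1)) = pvRoot p (pvIdx comp.length q.1) := by
      have h5 := hroots (pvIdx comp.length q.1) hjul
      rw [← h5]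
      exact root_isRoot _ hWF _ (by omega)
    have hstepv : pvStep (findA (comp.length + 1) (findA (comp.length + 1) p q.1).1 q.2).1
        (pvRoot p (pvIdx comp.length q.2)) = pvRoot p (pvIdx comp.length q.2) := by
      have h5 := hroots (pvIdx comp.length q.2) hjvl
      rw [← h5]
      exact root_isRoot _ hWF _ (by omega)
    have hWLuv : ∀ a, a < comp.length →
        ((pvRoot (findA (comp.length + 1) (findA (comp.length + 1) p q.1).1 q.2).1 a
            = pvRoot p (pvIdx comp.length q.1)
          ∨ pvRoot (findA (comp.length + 1) (findA (comp.length + 1) p q.1).1 q.2).1 a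
            = pvRoot p (pvIdx comp.length q.2))
          ↔ (comp.getD a 0 = pvGet comp q.1 ∨ comp.getD a 0 = pvGet comp q.2)) := by
      intro a ha
      rw [hroots a ha]
      exact or_congr (hAu a ha) (hAv a ha)
    split_ifs with hr1 hr2
    · rw [hval1, hval2]
      exact merged_inv _ comp hL hWF hiff2 _ _ hrul hrvl hstepu hstepv _ _ hWLuv
    · rw [hval1, hval2]
      refine merged_inv _ comp hL hWF hiff2 _ _ hrvl hrul hstepv hstepu _ _ ?_
      intro a ha
      rw [or_comm]
      exact hWLuv a ha
    · rw [hval1, hval2]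
      exact merged_inv _ comp hL hWF hiff2 _ _ hrul hrvl hstepu hstepv _ _ hWLuv

set_option maxHeartbeats 1000000 in
lemma check_eq (ineqs : List (Int × Int)) (p comp : List Int) (N : Nat) (hN : comp.length = N)
    (hinv : pvInv p comp)
    (hq : ∀ q ∈ ineqs, -(comp.length : Int) ≤ q.1 ∧ q.1 < comp.length ∧
      -(comp.length : Int) ≤ q.2 ∧ q.2 < comp.length) :
    checkA (N + 1) p ineqs = ineqs.all (fun q => !(pvGet comp q.1 == pvGet comp q.2)) := by
  subst hN
  induction ineqs generalizing p with
  | nil => rfl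
  | cons q rest ih =>
    obtain ⟨hL, hWF, hroots, hval1, hval2, hiffr, hAu, hAv⟩ :=
      find2 p comp q hinv (hq q (List.mem_cons_self))
    have hinv2 : pvInv (findA (comp.length + 1) (findA (comp.length + 1) p q.1).1 q.2).1 comp :=
      ⟨hL, hWF, fun a b ha hb => by
        rw [hroots a ha, hroots b hb]
        exact hinv.2.2 a b ha hb⟩
    simp only [checkA]
    by_cases hcc : pvGet comp q.1 = pvGet comp q.2
    · rw [if_pos (by rw [hval1, hval2, hiffr.mpr hcc])]
      simp [hcc]
    · rw [if_neg (show (findA (comp.length + 1) p q.1).2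
          ≠ (findA (comp.length + 1) (findA (comp.length + 1) p q.1).1 q.2).2 from by
        rw [hval1, hval2]
        intro h
        exact hcc (hiffr.mp (by exact_mod_cast h)))]
      rw [ih _ hinv2 (fun r hr => hq r (List.mem_cons_of_mem q hr))]
      simp [hcc]

lemma foldB_len (eqs : List (Int × Int)) (comp : List Int) :
    (eqs.foldl (fun comp q =>
      let ci := pvGet comp q.1
      let cj := pvGet comp q.2
      if ci ≠ cj then comp.map (fun c => if c = ci then cj else c) else comp) comp).length
      = comp.length := by
  induction eqs generalizing comp with
  | nil => rfl
  | cons q rest ih =>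
    simp only [List.foldl_cons]
    rw [ih]
    show (if pvGet comp q.1 ≠ pvGet comp q.2
      then comp.map (fun c => if c = pvGet comp q.1 then pvGet comp q.2 else c) else comp).length
      = comp.length
    split_ifs <;> simp

lemma fold_inv (eqs : List (Int × Int)) (p rank comp : List Int) (N : Nat) (hN : comp.length = N)
    (hinv : pvInv p comp)
    (hq : ∀ q ∈ eqs, -(comp.length : Int) ≤ q.1 ∧ q.1 < comp.length ∧
      -(comp.length : Int) ≤ q.2 ∧ q.2 < comp.length) :
    pvInv (eqs.foldl (fun st q => unionA (N + 1) st.1 st.2 q.1 q.2) (p, rank)).1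
      (eqs.foldl (fun comp q =>
        let ci := pvGet comp q.1
        let cj := pvGet comp q.2
        if ci ≠ cj then comp.map (fun c => if c = ci then cj else c) else comp) comp) := by
  induction eqs generalizing p rank comp with
  | nil => exact hinv
  | cons q rest ih =>
    simp only [List.foldl_cons]
    have hstep := union_step p rank comp q hinv (hq q (List.mem_cons_self))
    rw [hN] at hstep
    have hlenB : (if pvGet comp q.1 ≠ pvGet comp q.2
        then comp.map (fun c => if c = pvGet comp q.1 then pvGet comp q.2 else c) else comp).length
        = comp.length := by split_ifs <;> simp
    exact ih (unionA (N + 1) p rank q.1 q.2).1 (unionA (N + 1) p rank q.1 q.2).2 _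
      (hlenB.trans hN) hstep
      (fun r hr => by rw [hlenB]; exact hq r (List.mem_cons_of_mem q hr))

-- ===== VERDICT (by name: the statement is the Claim_ definition above) =====
theorem can_satisfy_constraints_spec : Claim_equal_can_satisfy_constraints := by
  intro n eqs ineqs hdom hpre
  unfold Spec_can_satisfy_constraints can_satisfy_constraints can_satisfy_constraints_alt
  obtain ⟨hpe, hpi⟩ := hpre
  have hlen0 : ((List.range n.toNat).map (fun (i : Nat) => (i : Int))).length = n.toNat := by simp
  have hbe : ∀ q ∈ eqs,
      -((((List.range n.toNat).map (fun (i : Nat) => (i : Int))).length : Nat) : Int) ≤ q.1 ∧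
        q.1 < (((List.range n.toNat).map (fun (i : Nat) => (i : Int))).length : Nat) ∧
        -((((List.range n.toNat).map (fun (i : Nat) => (i : Int))).length : Nat) : Int) ≤ q.2 ∧
        q.2 < (((List.range n.toNat).map (fun (i : Nat) => (i : Int))).length : Nat) := by
    intro r hr
    have h := hpe r hr
    rw [hlen0]
    refine ⟨?_, ?_, ?_, ?_⟩ <;> omega
  have hfold := fold_inv eqs ((List.range n.toNat).map (fun (i : Nat) => (i : Int)))
    (List.replicate n.toNat (0 : Int)) ((List.range n.toNat).map (fun (i : Nat) => (i : Int)))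
    n.toNat hlen0 (pvInv_init n.toNat) hbe
  have hNF : (eqs.foldl (fun comp q =>
      let ci := pvGet comp q.1
      let cj := pvGet comp q.2
      if ci ≠ cj then comp.map (fun c => if c = ci then cj else c) else comp)
      ((List.range n.toNat).map (fun (i : Nat) => (i : Int)))).length = n.toNat :=
    (foldB_len eqs _).trans hlen0
  refine check_eq ineqs _ _ n.toNat hNF hfold ?_
  intro r hr
  have h := hpi r hr
  rw [hNF]
  refine ⟨?_, ?_, ?_, ?_⟩ <;> omega
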